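-- pv_equiv track=rewrite | github.com/letminjae/PCCP | Programmers/LV1/240521/4.py | solution
-- ===== SOURCE A (Python) =====
-- def solution(s):
--     answer = 0
--     first_cnt = 0
--     other_cnt = 0
--
--     for i in s:
--         if first_cnt == other_cnt:
--             answer += 1
--             tmp = i
--
--         if tmp == i:
--             first_cnt += 1
--         else:
--             other_cnt += 1
--
--     return answer
-- ===== SOURCE B (Python) =====
-- def solution(s):
--     # Stage 1: run-length encode the string.
--     runs = []
--     for c in s:
--         if runs and runs[-1][0] == c:
--             runs[-1][1] += 1
--         else:
--             runs.append([c, 1])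
--     # Stage 2: consume runs group by group, jumping a whole run at a time;
--     # the zero crossing of the balance can only happen inside a non-ref run,
--     # exactly `bal` characters into it.
--     answer = 0
--     i = 0    # current run index
--     off = 0  # characters of runs[i] already consumed
--     while i < len(runs):
--         answer += 1
--         ref = runs[i][0]
--         bal = 0
--         while i < len(runs):
--             ch, ln = runs[i]
--             avail = ln - off
--             if ch == ref:
--                 bal += avail
--                 i += 1
--                 off = 0
--             elif avail >= bal:
--                 off += bal
--                 if off == ln:
--                     i += 1
--                     off = 0
--                 break
--             else:
--                 bal -= avail
--                 i += 1
--                 off = 0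
--     return answer
-- ===== Notes on version B (the rewrite author's own statement) =====
-- stated objective: alternative
-- what changed: Replaces A's character-by-character scan with three counters by a staged algorithm: first run-length encode the string, then consume whole runs at a time, computing the balance's zero crossing inside a run arithmetically.
import Mathlib
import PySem

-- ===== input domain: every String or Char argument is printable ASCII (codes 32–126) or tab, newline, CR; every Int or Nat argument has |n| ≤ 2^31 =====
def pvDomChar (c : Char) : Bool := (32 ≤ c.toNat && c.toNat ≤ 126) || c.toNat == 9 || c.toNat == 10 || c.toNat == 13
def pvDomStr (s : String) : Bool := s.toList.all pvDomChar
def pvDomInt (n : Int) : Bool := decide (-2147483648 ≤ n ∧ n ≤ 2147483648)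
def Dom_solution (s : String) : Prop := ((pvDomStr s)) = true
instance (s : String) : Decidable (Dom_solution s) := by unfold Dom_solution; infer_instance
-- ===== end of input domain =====

-- B stages the work differently (alternative, same O(n) cost): run-length encode first, then consume
-- whole runs per group with an arithmetic zero-crossing test; return value only, no side effects.

-- ===== PORT A =====
-- one loop iteration of A; Python's `tmp` is unassigned before the loop but is
-- always assigned on the first iteration (first_cnt == other_cnt there), so an
-- arbitrary initial Char is behaviourally irrelevant.
def pvStepA (st : Int × Int × Int × Char) (i : Char) : Int × Int × Int × Char :=
  let (answer, first_cnt, other_cnt, tmp) := st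
  let (answer, tmp) := if first_cnt == other_cnt then (answer + 1, i) else (answer, tmp)
  if tmp == i then (answer, first_cnt + 1, other_cnt, tmp)
  else (answer, first_cnt, other_cnt + 1, tmp)

def solution (s : String) : Int :=
  (s.toList.foldl pvStepA (0, 0, 0, ' ')).1

-- ===== PORT B =====
-- stage 1 of Source B: one step of the run-length encoding loop (append or bump the last run)
def pvRle (runs : List (Char × Int)) (c : Char) : List (Char × Int) :=
  match runs.getLast? with
  | some (ch, n) => if ch == c then runs.dropLast ++ [(ch, n + 1)] else runs ++ [(c, 1)]
  | none => runs ++ [(c, 1)]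

-- stage 2 inner while of Source B: jump over runs; returns (remaining runs, offset into their head)
def pvInnerB (ref : Char) (bal off : Int) : List (Char × Int) → List (Char × Int) × Int
  | [] => ([], off)
  | (ch, ln) :: rest =>
    let avail := ln - off
    if ch == ref then pvInnerB ref (bal + avail) 0 rest
    else if avail ≥ bal then
      (if off + bal = ln then (rest, 0) else ((ch, ln) :: rest, off + bal))
    else pvInnerB ref (bal - avail) 0 rest

-- stage 2 outer while of Source B; the fuel argument only makes the loop total (each
-- iteration consumes at least one character, so s.length + 1 is never exhausted —
-- proved in the lemmas below), it changes no computation.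
def pvOuterB : Nat → List (Char × Int) → Int → Int
  | 0, _, _ => 0
  | _ + 1, [], _ => 0
  | fuel + 1, (ch, ln) :: rest, off =>
    let r := pvInnerB ch 0 off ((ch, ln) :: rest)
    1 + pvOuterB fuel r.1 r.2

def solution_alt (s : String) : Int :=
  pvOuterB (s.toList.length + 1) (s.toList.foldl pvRle []) 0

-- ===== PRECONDITION & SPEC =====
def Spec_solution (s : String) (out : Int) : Prop := out = solution_alt s
instance (s : String) (out : Int) : Decidable (Spec_solution s out) := by unfold Spec_solution; infer_instance

-- ===== CLAIM (what is proved, stated in full; the proofs are below) =====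
def Claim_equal_solution : Prop := ∀ (s : String), Dom_solution s → Spec_solution s (solution s)

-- ===== LEMMAS AND PROOFS =====

-- char-level reference model: consume chars of one group until the balance hits 0
def pvCInner (ref : Char) (bal : Int) : List Char → List Char
  | [] => []
  | c :: rest =>
    let bal' := if c == ref then bal + 1 else bal - 1
    if bal' = 0 then rest else pvCInner ref bal' rest

theorem pvCInner_length_le (ref : Char) (bal : Int) (l : List Char) :
    (pvCInner ref bal l).length ≤ l.length := by
  induction l generalizing bal with
  | nil => simp [pvCInner]
  | cons c rest ih =>
    simp only [pvCInner]
    split <;> split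
    all_goals first
      | exact Nat.le_succ _
      | exact le_trans (ih _) (Nat.le_succ _)

-- char-level reference model: one group per step
def pvCOuter : List Char → Int
  | [] => 0
  | c :: rest => 1 + pvCOuter (pvCInner c 1 rest)
termination_by l => l.length
decreasing_by
  simpa using Nat.lt_succ_of_le (pvCInner_length_le c 1 rest)

-- A = char-level model: A's counters satisfy first_cnt - other_cnt = the model's
-- balance within a group, and a new group starts exactly when the counters are equal.
theorem pvKey (l : List Char) : ∀ (ans fc oc : Int) (ref : Char),
    (List.foldl pvStepA (ans, fc, oc, ref) l).1 =
      ans + (if fc = oc then pvCOuter l else pvCOuter (pvCInner ref (fc - oc) l)) := by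
  induction l with
  | nil => intro ans fc oc ref; by_cases h : fc = oc <;> simp [h, pvCOuter, pvCInner]
  | cons c rest ih =>
    intro ans fc oc ref
    rw [List.foldl_cons]
    by_cases h : fc = oc
    · have hs : pvStepA (ans, fc, oc, ref) c = (ans + 1, fc + 1, oc, c) := by
        simp [pvStepA, h]
      rw [hs, ih]
      have hne : ¬ (fc + 1 = oc) := by omega
      rw [pvCOuter]
      have : fc + 1 - oc = 1 := by omega
      simp [h]
      ring
    · by_cases hc : c = ref
      · have hs : pvStepA (ans, fc, oc, ref) c = (ans, fc + 1, oc, ref) := by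
          simp [pvStepA, h, hc]
        rw [hs, ih]
        by_cases hz : fc + 1 = oc
        · have : pvCInner ref (fc - oc) (c :: rest) = rest := by
            simp [pvCInner, hc]; omega
          simp [h, hz, this]
        · have : pvCInner ref (fc - oc) (c :: rest) = pvCInner ref (fc - oc + 1) rest := by
            have hnz : ¬ (fc - oc + 1 = 0) := by omega
            simp [pvCInner, hc, hnz]
          have e : fc + 1 - oc = fc - oc + 1 := by ring
          simp [h, hz, this, e]
      · have hs : pvStepA (ans, fc, oc, ref) c = (ans, fc, oc + 1, ref) := by
          have : ¬ (ref = c) := fun e => hc e.symm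
          simp [pvStepA, h, this]
        rw [hs, ih]
        by_cases hz : fc = oc + 1
        · have : pvCInner ref (fc - oc) (c :: rest) = rest := by
            have : ¬ (c = ref) := hc
            simp [pvCInner, this]; omega
          rw [if_pos hz, if_neg h, this]
        · have : pvCInner ref (fc - oc) (c :: rest) = pvCInner ref (fc - oc - 1) rest := by
            have hnz : ¬ (fc - oc - 1 = 0) := by omega
            have hcc : ¬ (c = ref) := hc
            simp [pvCInner, hcc, hnz]
          have e : fc - (oc + 1) = fc - oc - 1 := by ring
          simp [h, hz, this, e]

-- expansion of a run list back to characters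
def pvExpand (runs : List (Char × Int)) : List Char :=
  runs.flatMap (fun p => List.replicate p.2.toNat p.1)

-- expansion of the stage-2 state (run list + offset into its head)
def pvE (runs : List (Char × Int)) (off : Int) : List Char :=
  match runs with
  | [] => []
  | (c, n) :: rest => List.replicate (n - off).toNat c ++ pvExpand rest

-- well-formedness of a run list: every run length is ≥ 1
def pvWf (runs : List (Char × Int)) : Prop := ∀ p ∈ runs, 1 ≤ p.2

-- the offset is admissible for the head run
def pvOffOk : List (Char × Int) → Int → Prop
  | [], _ => True
  | (_, n) :: _, off => 0 ≤ off ∧ off < n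

theorem pvE_zero (runs : List (Char × Int)) : pvE runs 0 = pvExpand runs := by
  cases runs with
  | nil => rfl
  | cons p rest => cases p; simp [pvE, pvExpand]

theorem pvOffOk_zero (runs : List (Char × Int)) (hwf : pvWf runs) : pvOffOk runs 0 := by
  cases runs with
  | nil => trivial
  | cons p rest =>
    cases p with
    | mk c n =>
      have := hwf (c, n) (List.mem_cons_self ..)
      exact ⟨le_refl 0, by simpa using this⟩

-- run-length encoding is sound: it is well formed and expands back to the input
theorem pvRle_sound (l : List Char) : ∀ acc, pvWf acc →
    pvWf (l.foldl pvRle acc) ∧ pvExpand (l.foldl pvRle acc) = pvExpand acc ++ l := by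
  induction l with
  | nil => intro acc h; simpa using h
  | cons c rest ih =>
    intro acc hacc
    have step : pvWf (pvRle acc c) ∧ pvExpand (pvRle acc c) = pvExpand acc ++ [c] := by
      unfold pvRle
      cases hlast : acc.getLast? with
      | none =>
        have : acc = [] := List.getLast?_eq_none_iff.mp hlast
        subst this
        constructor
        · intro p hp; simp at hp; simp [hp]
        · simp [pvExpand]
      | some p =>
        cases p with
        | mk ch n =>
          have hmem : (ch, n) ∈ acc := List.mem_of_getLast? hlast
          have hn : 1 ≤ n := hacc _ hmem
          have hdrop : acc.dropLast ++ [(ch, n)] = acc := by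
            have := List.getLast?_eq_some_iff.mp hlast
            obtain ⟨ys, hys⟩ := this
            simp [hys]
          by_cases hch : ch = c
          · subst hch
            simp only [beq_self_eq_true, if_true]
            constructor
            · intro p hp
              rcases List.mem_append.mp hp with h1 | h1
              · exact hacc _ (List.mem_of_mem_dropLast h1)
              · simp at h1; simp [h1]; omega
            · have e1 : pvExpand (acc.dropLast ++ [(ch, n + 1)]) =
                  pvExpand acc.dropLast ++ List.replicate (n + 1).toNat ch := by
                simp [pvExpand]
              have e2 : pvExpand acc = pvExpand acc.dropLast ++ List.replicate n.toNat ch := by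
                conv_lhs => rw [← hdrop]
                simp [pvExpand]
              have e3 : List.replicate (n + 1).toNat ch =
                  List.replicate n.toNat ch ++ [ch] := by
                have : (n + 1).toNat = n.toNat + 1 := by omega
                rw [this, List.replicate_succ']
              rw [e1, e2, e3]
              simp
          · have hbe : (ch == c) = false := by simp [hch]
            simp only [hbe, Bool.false_eq_true, if_false]
            constructor
            · intro p hp
              rcases List.mem_append.mp hp with h1 | h1
              · exact hacc _ h1
              · simp at h1; simp [h1]
            · simp [pvExpand]
    rcases step with ⟨hw, he⟩
    rcases ih (pvRle acc c) hw with ⟨hw2, he2⟩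
    refine ⟨hw2, ?_⟩
    rw [List.foldl_cons] at *
    rw [he2, he]
    simp

-- replicate lemmas for the char-level inner loop
theorem pvCInner_replicate_eq (ref : Char) (k : Nat) :
    ∀ (b : Int) (t : List Char), 1 ≤ b →
      pvCInner ref b (List.replicate k ref ++ t) = pvCInner ref (b + k) t := by
  induction k with
  | zero => intro b t _; simp
  | succ k ih =>
    intro b t hb
    rw [List.replicate_succ, List.cons_append]
    simp only [pvCInner, beq_self_eq_true, if_true]
    have hnz : ¬ (b + 1 = 0) := by omega
    rw [if_neg hnz, ih (b + 1) t (by omega)]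
    congr 1
    push_cast
    ring

theorem pvCInner_replicate_ne_small (ref d : Char) (hd : (d == ref) = false) (k : Nat) :
    ∀ (b : Int) (t : List Char), (k : Int) < b →
      pvCInner ref b (List.replicate k d ++ t) = pvCInner ref (b - k) t := by
  induction k with
  | zero => intro b t _; simp
  | succ k ih =>
    intro b t hk
    rw [List.replicate_succ, List.cons_append]
    simp only [pvCInner, hd, Bool.false_eq_true, if_false]
    have hnz : ¬ (b - 1 = 0) := by push_cast at hk ⊢; omega
    rw [if_neg hnz, ih (b - 1) t (by push_cast at hk ⊢; omega)]
    congr 1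
    push_cast
    ring

theorem pvCInner_replicate_ne_cross (ref d : Char) (hd : (d == ref) = false) (k : Nat) :
    ∀ (b : Int) (t : List Char), 1 ≤ b → b ≤ (k : Int) →
      pvCInner ref b (List.replicate k d ++ t) = List.replicate (k - b.toNat) d ++ t := by
  induction k with
  | zero => intro b t hb hk; exfalso; omega
  | succ k ih =>
    intro b t hb hk
    rw [List.replicate_succ, List.cons_append]
    simp only [pvCInner, hd, Bool.false_eq_true, if_false]
    by_cases h1 : b - 1 = 0
    · rw [if_pos h1]
      have : b.toNat = 1 := by omega
      rw [this]
      simp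
    · rw [if_neg h1, ih (b - 1) t (by omega) (by push_cast at hk ⊢; omega)]
      congr 2
      omega

-- stage-2 inner loop simulates the char-level inner loop on the expansion
theorem pvInnerB_sim (ref : Char) : ∀ (runs : List (Char × Int)) (bal off : Int),
    pvWf runs → pvOffOk runs off → 1 ≤ bal →
    pvCInner ref bal (pvE runs off) = pvE (pvInnerB ref bal off runs).1 (pvInnerB ref bal off runs).2
      ∧ pvWf (pvInnerB ref bal off runs).1
      ∧ pvOffOk (pvInnerB ref bal off runs).1 (pvInnerB ref bal off runs).2 := by
  intro runs
  induction runs with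
  | nil => intro bal off _ _ _; exact ⟨by simp [pvE, pvInnerB, pvCInner], by intro p hp; simp [pvInnerB] at hp, trivial⟩
  | cons p rest ih =>
    rcases p with ⟨ch, ln⟩
    intro bal off hwf hoff hbal
    rcases hoff with ⟨hoff0, hoffln⟩
    have hwfrest : pvWf rest := fun q hq => hwf q (List.mem_cons_of_mem _ hq)
    have havail : 1 ≤ ln - off := by omega
    have hE : pvE ((ch, ln) :: rest) off =
        List.replicate (ln - off).toNat ch ++ pvExpand rest := rfl
    by_cases hch : ch = ref
    · subst hch
      have hstep : pvInnerB ch bal off ((ch, ln) :: rest) =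
          pvInnerB ch (bal + (ln - off)) 0 rest := by
        simp [pvInnerB]
      rw [hstep, hE]
      have e1 : pvCInner ch bal (List.replicate (ln - off).toNat ch ++ pvExpand rest) =
          pvCInner ch (bal + (ln - off).toNat) (pvExpand rest) :=
        pvCInner_replicate_eq ch (ln - off).toNat bal (pvExpand rest) hbal
      have e2 : (((ln - off).toNat : Int)) = ln - off := by omega
      rw [e1, e2, ← pvE_zero]
      exact ih (bal + (ln - off)) 0 hwfrest (pvOffOk_zero rest hwfrest) (by omega)
    · have hbe : (ch == ref) = false := by simp [hch]
      have hbe' : (ch == ref) = false := hbe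
      by_cases hcross : ln - off ≥ bal
      · -- crossing inside this run
        have hk : bal ≤ ((ln - off).toNat : Int) := by omega
        have ecross := pvCInner_replicate_ne_cross ref ch hbe (ln - off).toNat bal
          (pvExpand rest) hbal hk
        by_cases hend : off + bal = ln
        · have hstep : pvInnerB ref bal off ((ch, ln) :: rest) = (rest, 0) := by
            simp only [pvInnerB, hbe, Bool.false_eq_true, if_false]
            rw [if_pos hcross, if_pos hend]
          rw [hstep, hE, ecross]
          have : (ln - off).toNat - bal.toNat = 0 := by omega
          rw [this]
          exact ⟨by simp [pvE_zero], hwfrest, pvOffOk_zero rest hwfrest⟩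
        · have hstep : pvInnerB ref bal off ((ch, ln) :: rest) = ((ch, ln) :: rest, off + bal) := by
            simp only [pvInnerB, hbe, Bool.false_eq_true, if_false]
            rw [if_pos hcross, if_neg hend]
          rw [hstep, hE, ecross]
          refine ⟨?_, hwf, ⟨by omega, by omega⟩⟩
          show _ = List.replicate (ln - (off + bal)).toNat ch ++ pvExpand rest
          congr 2
          omega
      · -- run exhausted without crossing
        have hlt : ((ln - off).toNat : Int) < bal := by omega
        have hstep : pvInnerB ref bal off ((ch, ln) :: rest) =
            pvInnerB ref (bal - (ln - off)) 0 rest := by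
          simp only [pvInnerB, hbe, Bool.false_eq_true, if_false]
          rw [if_neg (by omega)]
        rw [hstep, hE]
        have e1 := pvCInner_replicate_ne_small ref ch hbe (ln - off).toNat bal
          (pvExpand rest) hlt
        have e2 : bal - ((ln - off).toNat : Int) = bal - (ln - off) := by omega
        rw [e1, e2, ← pvE_zero]
        exact ih (bal - (ln - off)) 0 hwfrest (pvOffOk_zero rest hwfrest) (by omega)

-- stage-2 outer loop computes the char-level model on the expansion (fuel suffices)
theorem pvOuterB_sim : ∀ (fuel : Nat) (runs : List (Char × Int)) (off : Int),
    pvWf runs → pvOffOk runs off → (pvE runs off).length < fuel →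
    pvOuterB fuel runs off = pvCOuter (pvE runs off) := by
  intro fuel
  induction fuel with
  | zero => intro runs off _ _ h; omega
  | succ fuel ih =>
    intro runs off hwf hoff hlen
    cases runs with
    | nil => simp [pvOuterB, pvE, pvCOuter]
    | cons p rest =>
      rcases p with ⟨ch, ln⟩
      rcases hoff with ⟨hoff0, hoffln⟩
      have hwfrest : pvWf rest := fun q hq => hwf q (List.mem_cons_of_mem _ hq)
      have havail : 1 ≤ ln - off := by omega
      -- head of the expansion
      have hk : (ln - off).toNat = ((ln - off).toNat - 1) + 1 := by omega
      have hE : pvE ((ch, ln) :: rest) off =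
          ch :: (List.replicate ((ln - off).toNat - 1) ch ++ pvExpand rest) := by
        show List.replicate (ln - off).toNat ch ++ pvExpand rest = _
        rw [hk, List.replicate_succ]
        simp
      -- the first step of pvInnerB with bal = 0
      have hfirst : pvInnerB ch 0 off ((ch, ln) :: rest) = pvInnerB ch (ln - off) 0 rest := by
        simp [pvInnerB]
      -- char-level inner over the rest of the head run
      have hgroup : pvCInner ch 1 (List.replicate ((ln - off).toNat - 1) ch ++ pvExpand rest) =
          pvCInner ch (ln - off) (pvE rest 0) := by
        rw [pvCInner_replicate_eq ch _ 1 _ (by omega), pvE_zero]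
        congr 1
        omega
      have hsim := pvInnerB_sim ch rest (ln - off) 0 hwfrest (pvOffOk_zero rest hwfrest)
        (by omega)
      rcases hsim with ⟨hsimE, hsimW, hsimO⟩
      have houter : pvCOuter (pvE ((ch, ln) :: rest) off) =
          1 + pvCOuter (pvE (pvInnerB ch (ln - off) 0 rest).1 (pvInnerB ch (ln - off) 0 rest).2) := by
        rw [hE, pvCOuter, hgroup, hsimE]
      have hlen2 : (pvE (pvInnerB ch (ln - off) 0 rest).1 (pvInnerB ch (ln - off) 0 rest).2).length < fuel := by
        rw [← hsimE]
        have h1 := pvCInner_length_le ch (ln - off) (pvE rest 0)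
        have h2 : (pvE ((ch, ln) :: rest) off).length =
            (ln - off).toNat + (pvE rest 0).length := by
          rw [hE, pvE_zero]
          simp
          omega
        omega
      rw [houter, pvOuterB, hfirst, ih _ _ hsimW hsimO hlen2]

-- ===== VERDICT (by name: the statement is the Claim_ definition above) =====
theorem solution_spec : Claim_equal_solution := by
  intro s _
  unfold Spec_solution solution solution_alt
  have hwf0 : pvWf ([] : List (Char × Int)) := by intro p hp; simp at hp
  rcases pvRle_sound s.toList [] hwf0 with ⟨hwf, hexp⟩
  rw [show pvExpand ([] : List (Char × Int)) = [] from rfl, List.nil_append] at hexp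
  have hOk := pvOffOk_zero _ hwf
  have hlen : (pvE (s.toList.foldl pvRle []) 0).length < s.toList.length + 1 := by
    rw [pvE_zero, hexp]; omega
  rw [pvOuterB_sim _ _ _ hwf hOk hlen, pvE_zero, hexp, pvKey]
  simp
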